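-- pv_equiv track=rewrite | github.com/Raina99U/Load_file-EXE- | load_file.py | generate_new_column_names
-- ===== SOURCE A (Python) =====
-- def generate_new_column_names(num_columns):
--     columns = []
--     for i in range(1, num_columns + 1):
--         column_name = ""
--         while i > 0:
--             i, remainder = divmod(i - 1, 26)
--             column_name = chr(65 + remainder) + column_name
--         columns.append(column_name)
--     return columns
-- ===== SOURCE B (Python) =====
-- def _inc(rev):
--     # rev holds the name's characters least-significant first; bijective base-26 odometer step
--     if not rev:
--         return ['A']
--     if rev[0] == 'Z':
--         return ['A'] + _inc(rev[1:])
--     return [chr(ord(rev[0]) + 1)] + rev[1:]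
--
--
-- def generate_new_column_names(num_columns):
--     out = []
--     rev = []
--     for _ in range(num_columns):
--         rev = _inc(rev)
--         out.append(''.join(reversed(rev)))
--     return out
-- ===== Notes on version B (the rewrite author's own statement) =====
-- stated objective: alternative
-- what changed: B generates each name by incrementing the previous name as a bijective base-26 odometer (carry Z->A, prepend A on overflow) instead of A's independent divmod conversion of each index.
import Mathlib
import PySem

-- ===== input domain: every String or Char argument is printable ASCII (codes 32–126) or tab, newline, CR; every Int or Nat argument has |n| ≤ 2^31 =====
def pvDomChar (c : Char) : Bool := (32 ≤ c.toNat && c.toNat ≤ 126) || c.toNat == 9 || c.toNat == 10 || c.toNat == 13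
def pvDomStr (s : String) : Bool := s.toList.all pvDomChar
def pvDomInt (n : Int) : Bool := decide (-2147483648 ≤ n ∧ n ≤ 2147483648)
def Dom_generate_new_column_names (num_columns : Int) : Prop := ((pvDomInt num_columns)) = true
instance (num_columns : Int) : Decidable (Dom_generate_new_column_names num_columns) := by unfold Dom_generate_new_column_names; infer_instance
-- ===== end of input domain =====

-- B replaces A's per-index bijective base-26 conversion by an odometer that increments the
-- previous name in place (objective: alternative decomposition, same asymptotic cost).

-- ===== PORT A =====
-- the inner `while i > 0` loop of A
def pvAWhile (i : Int) (column_name : List Char) : List Char :=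
  if h : 0 < i then
    pvAWhile (PySem.Int.floordiv (i - 1) 26)
      (Char.ofNat (65 + PySem.Int.mod (i - 1) 26).toNat :: column_name)
  else column_name
termination_by i.toNat
decreasing_by
  have h26 : (0:Int) < 26 := by norm_num
  rw [PySem.Int.floordiv_eq_ediv_of_pos h26]
  have h1 : (i - 1) / 26 ≤ i - 1 := Int.ediv_le_self _ (by omega)
  have h2 : (0:Int) ≤ (i - 1) / 26 := Int.ediv_nonneg (by omega) (by omega)
  omega

def generate_new_column_names (num_columns : Int) : List String :=
  (PySem.List.pyRange 1 (num_columns + 1) 1).foldl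
    (fun columns i => columns ++ [String.ofList (pvAWhile i [])]) []

-- ===== PORT B =====
-- odometer step on the name's characters held least-significant first
def pvInc (rev : List Char) : List Char :=
  match rev with
  | [] => ['A']
  | c :: rest => if c = 'Z' then 'A' :: pvInc rest else Char.ofNat (c.toNat + 1) :: rest

def generate_new_column_names_alt (num_columns : Int) : List String :=
  ((PySem.List.pyRange 0 num_columns 1).foldl
    (fun (st : List String × List Char) _ =>
      let rev := pvInc st.2
      (st.1 ++ [String.ofList rev.reverse], rev)) ([], [])).1

-- ===== PRECONDITION & SPEC =====
def Spec_generate_new_column_names (num_columns : Int) (out : List String) : Prop := out = generate_new_column_names_alt num_columns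
instance (num_columns : Int) (out : List String) : Decidable (Spec_generate_new_column_names num_columns out) := by unfold Spec_generate_new_column_names; infer_instance

-- ===== CLAIM (what is proved, stated in full; the proofs are below) =====
def Claim_equal_generate_new_column_names : Prop := ∀ (num_columns : Int), Dom_generate_new_column_names num_columns → Spec_generate_new_column_names num_columns (generate_new_column_names num_columns)

-- ===== LEMMAS AND PROOFS =====

-- bijective base-26 digits of k, least-significant first (mathematical reference form)
def pvDigits : Nat → List Char
  | 0 => []
  | k + 1 => Char.ofNat (65 + k % 26) :: pvDigits (k / 26)
decreasing_by exact Nat.lt_succ_of_le (Nat.div_le_self k 26)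

lemma pvChar_toNat (r : Nat) (h : r < 26) : (Char.ofNat (65 + r)).toNat = 65 + r := by
  have : Nat.isValidChar (65 + r) := Or.inl (by omega)
  simp [Char.ofNat, this]

lemma pvAWhile_eq (k : Nat) (name : List Char) :
    pvAWhile (k : Int) name = (pvDigits k).reverse ++ name := by
  induction k using Nat.strong_induction_on generalizing name with
  | _ k ih =>
    match k with
    | 0 => simp [pvAWhile, pvDigits]
    | m + 1 =>
      rw [pvAWhile]
      have h26 : (0:Int) < 26 := by norm_num
      have hm : ((m + 1 : Nat) : Int) - 1 = (m : Int) := by push_cast; ring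
      have hdiv : PySem.Int.floordiv (((m + 1 : Nat) : Int) - 1) 26 = ((m / 26 : Nat) : Int) := by
        rw [hm, PySem.Int.floordiv_eq_ediv_of_pos h26]; omega
      have hmod : PySem.Int.mod (((m + 1 : Nat) : Int) - 1) 26 = ((m % 26 : Nat) : Int) := by
        rw [hm, PySem.Int.mod_eq_emod_of_pos h26]; omega
      rw [dif_pos (show (0:Int) < ((m + 1 : Nat) : Int) by exact_mod_cast Nat.succ_pos m), hdiv, hmod]
      have htn : (65 + ((m % 26 : Nat) : Int)).toNat = 65 + m % 26 := by omega
      rw [htn, ih (m / 26) (Nat.lt_succ_of_le (Nat.div_le_self m 26))]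
      show (pvDigits (m / 26)).reverse ++ Char.ofNat (65 + m % 26) :: name
         = (pvDigits (m + 1)).reverse ++ name
      rw [pvDigits]
      simp

lemma pvInc_digits (k : Nat) : pvInc (pvDigits k) = pvDigits (k + 1) := by
  induction k using Nat.strong_induction_on with
  | _ k ih =>
    match k with
    | 0 => simp [pvDigits, pvInc]
    | m + 1 =>
      have hr : m % 26 < 26 := Nat.mod_lt _ (by norm_num)
      rw [pvDigits, pvInc]
      by_cases hz : m % 26 = 25
      · have hc : Char.ofNat (65 + m % 26) = 'Z' := by rw [hz]
        rw [if_pos hc, ih (m / 26) (Nat.lt_succ_of_le (Nat.div_le_self m 26))]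
        have h1 : (m + 1) % 26 = 0 := by omega
        have h2 : (m + 1) / 26 = m / 26 + 1 := by omega
        have hrhs : pvDigits (m + 1 + 1) = 'A' :: pvDigits (m / 26 + 1) := by
          rw [pvDigits, h1, h2]
        rw [hrhs]
      · have hc : Char.ofNat (65 + m % 26) ≠ 'Z' := by
          intro h
          have := congrArg Char.toNat h
          rw [pvChar_toNat _ hr] at this
          simp [Char.toNat] at this
          omega
        rw [if_neg hc]
        have h1 : (m + 1) % 26 = m % 26 + 1 := by omega
        have h2 : (m + 1) / 26 = m / 26 := by omega
        have hrhs : pvDigits (m + 1 + 1) = Char.ofNat (65 + (m % 26 + 1)) :: pvDigits (m / 26) := by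
          rw [pvDigits, h1, h2]
        rw [hrhs, pvChar_toNat _ hr, Nat.add_assoc]

-- the names emitted by B starting after k names have been produced
def pvNames (k m : Nat) : List String :=
  (List.range m).map (fun j => String.ofList (pvDigits (k + 1 + j)).reverse)

lemma pvNames_succ (k m : Nat) :
    pvNames k (m + 1) = String.ofList (pvDigits (k + 1)).reverse :: pvNames (k + 1) m := by
  unfold pvNames
  rw [List.range_succ_eq_map, List.map_cons, List.map_map]
  congr 1
  apply List.map_congr_left
  intro j _
  simp only [Function.comp]
  congr 3
  omega

lemma pvLoopB (l : List Int) (k : Nat) (acc : List String) :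
    l.foldl (fun (st : List String × List Char) _ =>
      let rev := pvInc st.2
      (st.1 ++ [String.ofList rev.reverse], rev)) (acc, pvDigits k)
    = (acc ++ pvNames k l.length, pvDigits (k + l.length)) := by
  induction l generalizing k acc with
  | nil => simp [pvNames]
  | cons x l ih =>
    simp only [List.foldl_cons]
    rw [show (pvInc (pvDigits k)) = pvDigits (k + 1) from pvInc_digits k]
    rw [ih (k + 1) (acc ++ [String.ofList (pvDigits (k + 1)).reverse])]
    rw [List.length_cons, pvNames_succ]
    have hk : k + 1 + l.length = k + (l.length + 1) := by omega
    rw [hk]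
    simp [List.append_assoc]

-- ===== VERDICT (by name: the statement is the Claim_ definition above) =====
theorem generate_new_column_names_spec : Claim_equal_generate_new_column_names := by
  intro n _
  unfold Spec_generate_new_column_names generate_new_column_names generate_new_column_names_alt
  rw [PySem.List.foldl_append_singleton_eq_map]
  have h0 : pvDigits 0 = [] := by simp [pvDigits]
  rw [← h0, pvLoopB]
  dsimp only
  rw [PySem.List.pyRange_one, PySem.List.pyRange_one]
  simp only [List.length_map, List.length_range, List.map_map, List.nil_append]
  have hlen : (n + 1 - 1).toNat = (n - 0).toNat := by omega
  rw [hlen]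
  unfold pvNames
  apply List.map_congr_left
  intro j _
  simp only [Function.comp]
  have h1 : (1:Int) + (j:Int) = ((j + 1 : Nat) : Int) := by push_cast; ring
  rw [h1, pvAWhile_eq, h0, List.append_nil]
  congr 3
  omega
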